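-- pv_equiv track=rewrite | github.com/JoshCheung/CMPS5P | PythonProj/Hw4/hw4.py | duplicates
-- ===== SOURCE A (Python) =====
-- def duplicates(ht):
--     '''returns a list of lines that contain duplicate entries
--     '''
--     lines_with_dupls = []
--     for i in range(len(ht)):
--         bucket = ht[i]
--         # for each element of bucket record its number of occurrences in the bucket
--         counts = [bucket.count(bucket[j]) for j in range(len(bucket))]
--         # there are no duplicates in bucket exactly when counts contains only 1s
--         if len(counts) != counts.count(1):
--             lines_with_dupls.append(i)
--     return lines_with_dupls
-- ===== SOURCE B (Python) =====
-- def duplicates(ht):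
--     '''returns a list of lines that contain duplicate entries
--     '''
--     lines_with_dupls = []
--     for i, bucket in enumerate(ht):
--         seen = set()
--         has_dup = False
--         for x in bucket:
--             if x in seen:
--                 has_dup = True
--                 break
--             seen.add(x)
--         if has_dup:
--             lines_with_dupls.append(i)
--     return lines_with_dupls
-- ===== Notes on version B (the rewrite author's own statement) =====
-- stated objective: faster
-- what changed: Replaces the per-bucket quadratic pass (bucket.count for every element, then counting 1s) with a single early-exiting pass over each bucket that maintains a seen-set and stops at the first repeated element.
import Mathlib
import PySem

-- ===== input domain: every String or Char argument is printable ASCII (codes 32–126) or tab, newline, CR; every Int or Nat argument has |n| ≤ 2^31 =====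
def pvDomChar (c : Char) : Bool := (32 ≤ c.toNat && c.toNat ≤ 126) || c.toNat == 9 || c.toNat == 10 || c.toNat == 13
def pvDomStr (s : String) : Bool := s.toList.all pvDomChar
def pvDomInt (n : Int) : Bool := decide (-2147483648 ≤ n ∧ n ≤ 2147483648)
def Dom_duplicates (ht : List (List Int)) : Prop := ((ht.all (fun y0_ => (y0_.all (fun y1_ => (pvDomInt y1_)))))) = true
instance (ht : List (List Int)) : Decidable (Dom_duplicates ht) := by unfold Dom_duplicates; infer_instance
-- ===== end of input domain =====

-- B replaces A's quadratic per-bucket count scan with a single early-exiting pass over each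
-- bucket using a seen-set (asymptotically faster; return value proved identical).


-- ===== PORT A =====
def duplicates (ht : List (List Int)) : List Int :=
  (PySem.List.pyRange 0 ht.length 1).foldl (fun lines_with_dupls i =>
    let bucket := PySem.List.pyGetD ht i []
    let counts := (PySem.List.pyRange 0 bucket.length 1).map
      (fun j => PySem.List.count bucket (PySem.List.pyGetD bucket j 0))
    if counts.length ≠ PySem.List.count counts 1 then lines_with_dupls ++ [i]
    else lines_with_dupls) []

-- ===== PORT B =====
-- the inner 'for x in bucket: if x in seen: has_dup = True; break' / 'seen.add(x)' loop
def bucketHasDup (seen : PySem.Set Int) : List Int → Bool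
  | [] => false
  | x :: xs =>
      if PySem.Set.contains seen x then true
      else bucketHasDup (PySem.Set.add seen x) xs

def duplicates_alt (ht : List (List Int)) : List Int :=
  (PySem.List.enumerate ht).foldl (fun lines_with_dupls p =>
    if bucketHasDup PySem.Set.empty p.2 then lines_with_dupls ++ [p.1]
    else lines_with_dupls) []

-- ===== PRECONDITION & SPEC =====
def Spec_duplicates (ht : List (List Int)) (out : List Int) : Prop := out = duplicates_alt ht
instance (ht : List (List Int)) (out : List Int) : Decidable (Spec_duplicates ht out) := by unfold Spec_duplicates; infer_instance

-- ===== CLAIM (what is proved, stated in full; the proofs are below) =====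
def Claim_equal_duplicates : Prop := ∀ (ht : List (List Int)), Dom_duplicates ht → Spec_duplicates ht (duplicates ht)

-- ===== LEMMAS AND PROOFS =====

-- the index→element map over pyRange collapses to a plain map over the list
theorem map_pyRange_pyGetD (xs : List Int) (f : Int → Nat) (d : Int) :
    (PySem.List.pyRange 0 xs.length 1).map (fun j => f (PySem.List.pyGetD xs j d)) = xs.map f := by
  conv_rhs => rw [← PySem.List.map_snd_enumerate xs 0]
  rw [PySem.List.enumerate_eq_map_pyRange xs d]
  simp [List.map_map, Function.comp]

-- A's per-bucket test holds iff the bucket has a repeated element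
theorem condA_iff (bucket : List Int) :
    ((bucket.map (fun x => PySem.List.count bucket x)).length ≠
      PySem.List.count (bucket.map (fun x => PySem.List.count bucket x)) 1) ↔
    ¬ bucket.Nodup := by
  simp only [PySem.List.count_eq, ne_eq]
  refine not_congr ?_
  rw [eq_comm, List.count_eq_length, List.nodup_iff_count_eq_one]
  constructor
  · intro h a ha; exact (h _ (List.mem_map.mpr ⟨a, ha, rfl⟩)).symm
  · intro h b hb
    obtain ⟨x, hx, rfl⟩ := List.mem_map.mp hb
    exact (h x hx).symm

-- B's inner loop returns true iff the list repeats an element or meets the seen-set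
theorem bucketHasDup_iff (seen : PySem.Set Int) (xs : List Int) :
    bucketHasDup seen xs = true ↔ ¬ xs.Nodup ∨ ∃ x ∈ xs, x ∈ seen := by
  induction xs generalizing seen with
  | nil => simp [bucketHasDup]
  | cons x xs ih =>
    simp only [bucketHasDup]
    by_cases hx : x ∈ seen
    · simp only [PySem.Set.contains]
      rw [if_pos (by simpa using hx)]
      simp only [true_iff]
      exact Or.inr ⟨x, List.mem_cons_self, hx⟩
    · rw [if_neg (by simp [PySem.Set.contains, hx]), ih]
      simp only [PySem.Set.mem_add, List.nodup_cons, List.mem_cons, not_and]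
      constructor
      · rintro (h | ⟨y, hy, hys | rfl⟩)
        · exact Or.inl (fun _ => h)
        · exact Or.inr ⟨y, Or.inr hy, hys⟩
        · exact Or.inl (fun h' => absurd hy h')
      · rintro (h | ⟨y, (rfl | hy), hys⟩)
        · by_cases hmem : x ∈ xs
          · exact Or.inr ⟨x, hmem, Or.inr rfl⟩
          · exact Or.inl (h hmem)
        · exact absurd hys hx
        · exact Or.inr ⟨y, hy, Or.inl hys⟩

-- the two per-bucket tests agree
theorem key (bucket : List Int) :
    ((bucket.map (fun x => PySem.List.count bucket x)).length ≠
      PySem.List.count (bucket.map (fun x => PySem.List.count bucket x)) 1) ↔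
    bucketHasDup PySem.Set.empty bucket = true := by
  rw [condA_iff, bucketHasDup_iff]
  simp [PySem.Set.empty]

-- ===== VERDICT (by name: the statement is the Claim_ definition above) =====
theorem duplicates_spec : Claim_equal_duplicates := by
  intro ht _
  unfold Spec_duplicates duplicates duplicates_alt
  rw [PySem.List.enumerate_eq_map_pyRange ht ([] : List Int), List.foldl_map]
  simp only [PySem.List.len]
  congr 1
  funext acc i
  simp only [map_pyRange_pyGetD]
  exact if_congr (key (PySem.List.pyGetD ht i [])) rfl rfl
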